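-- pv_equiv track=rewrite | github.com/AppSaintre/Crawling-Wiktionary | wiktcrl.py | stripNUbyte
-- ===== SOURCE A (Python) =====
-- hex_tbl = ['0','1','2','3','4','5','6','7','8','9','a','b','c','d','e','f']
--
-- def stripNUbyte(cont):
-- 	clist = list(cont)
-- 	ctr = 0
-- 	bnd = len(clist)
-- 	for it in clist:
-- 		flg = (it=='\\')and((ctr+3)<bnd)and(clist[ctr+1]=='x')and(clist[ctr+2] in hex_tbl)and(clist[ctr+3] in hex_tbl)
-- 		if(flg):
-- 			clist[ctr] = ''
-- 			clist[ctr+1] = ''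
-- 			clist[ctr+2] = ''
-- 			clist[ctr+3] = ''
-- 		ctr = ctr + 1
-- 	return ''.join(clist)
-- ===== SOURCE B (Python) =====
-- hex_tbl = ['0','1','2','3','4','5','6','7','8','9','a','b','c','d','e','f']
--
-- def stripNUbyte(cont):
--     clist = list(cont)
--     n = len(clist)
--     out = []
--     i = 0
--     while i < n:
--         if clist[i] == '\\' and (i + 3) < n and clist[i+1] == 'x' and clist[i+2] in hex_tbl and clist[i+3] in hex_tbl:
--             i += 4
--         else:
--             out.append(clist[i])
--             i += 1
--     return ''.join(out)
-- ===== Notes on version B (the rewrite author's own statement) =====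
-- stated objective: simpler
-- what changed: A copies the string into a list, scans every index and blanks all four cells of each matched \xHH escape in the mutated copy before joining the whole list; B is a single index-driven scan that skips 4 positions on a match and appends the character to the output otherwise, never mutating or revisiting cells.
import Mathlib
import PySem

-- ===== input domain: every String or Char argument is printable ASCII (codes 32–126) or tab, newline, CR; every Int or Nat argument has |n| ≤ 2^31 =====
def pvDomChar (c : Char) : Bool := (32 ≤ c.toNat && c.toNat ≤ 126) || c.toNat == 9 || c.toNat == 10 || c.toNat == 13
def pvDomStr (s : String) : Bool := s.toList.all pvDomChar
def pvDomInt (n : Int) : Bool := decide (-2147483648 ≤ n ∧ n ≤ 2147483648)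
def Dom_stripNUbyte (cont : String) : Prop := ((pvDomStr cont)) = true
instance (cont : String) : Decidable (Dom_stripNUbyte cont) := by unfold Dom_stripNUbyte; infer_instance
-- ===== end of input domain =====

-- B replaces A's blank-every-cell-of-a-mutated-copy pass by an index scan that skips 4 on a
-- match and emits the current character otherwise (objective: simpler; same O(n) cost).

-- ===== PORT A =====
-- list(cont) yields 1-char strings and A overwrites matched cells with '' in place,
-- so the mutable state is a List String; 'for it in clist' over the mutated list reads
-- clist[ctr] at each step, ported as index recursion over the same state.
def hexTbl : List String := ["0","1","2","3","4","5","6","7","8","9","a","b","c","d","e","f"]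

def stripA_loop (clist : List String) (ctr bnd : Nat) : List String :=
  if ctr < bnd then
    let it := clist.getD ctr ""
    let flg := (it == "\\") && decide (ctr + 3 < bnd) && (clist.getD (ctr+1) "" == "x")
        && hexTbl.contains (clist.getD (ctr+2) "") && hexTbl.contains (clist.getD (ctr+3) "")
    let clist' := if flg then
        ((((clist.set ctr "").set (ctr+1) "").set (ctr+2) "").set (ctr+3) "")
      else clist
    stripA_loop clist' (ctr+1) bnd
  else clist
termination_by bnd - ctr

def stripNUbyte (cont : String) : String :=
  let clist := cont.toList.map (fun c => String.ofList [c])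
  String.join (stripA_loop clist 0 clist.length)

-- ===== PORT B =====
def hexChars : List Char := ['0','1','2','3','4','5','6','7','8','9','a','b','c','d','e','f']

def stripB_cond (clist : List Char) (i : Nat) : Bool :=
  (clist.getD i ' ' == '\\') && decide (i + 3 < clist.length) && (clist.getD (i+1) ' ' == 'x')
    && hexChars.contains (clist.getD (i+2) ' ') && hexChars.contains (clist.getD (i+3) ' ')

def stripB_loop (clist : List Char) (i : Nat) (out : List Char) : String :=
  if i < clist.length then
    if stripB_cond clist i then stripB_loop clist (i+4) out
    else stripB_loop clist (i+1) (out ++ [clist.getD i ' '])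
  else String.ofList out
termination_by clist.length - i

def stripNUbyte_alt (cont : String) : String :=
  stripB_loop cont.toList 0 []

-- ===== PRECONDITION & SPEC =====
def Spec_stripNUbyte (cont : String) (out : String) : Prop := out = stripNUbyte_alt cont
instance (cont : String) (out : String) : Decidable (Spec_stripNUbyte cont out) := by unfold Spec_stripNUbyte; infer_instance

-- ===== CLAIM (what is proved, stated in full; the proofs are below) =====
def Claim_equal_stripNUbyte : Prop := ∀ (cont : String), Dom_stripNUbyte cont → Spec_stripNUbyte cont (stripNUbyte cont)

-- ===== LEMMAS AND PROOFS =====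

-- accumulator-free form of B's loop
def stripB_tail (clist : List Char) (i : Nat) : List Char :=
  if i < clist.length then
    if stripB_cond clist i then stripB_tail clist (i+4)
    else clist.getD i ' ' :: stripB_tail clist (i+1)
  else []
termination_by clist.length - i

theorem stripB_loop_eq (clist : List Char) (i : Nat) (out : List Char) :
    stripB_loop clist i out = String.ofList (out ++ stripB_tail clist i) := by
  fun_induction stripB_tail clist i generalizing out with
  | case1 i h hc ih =>
      rw [stripB_loop, if_pos h, if_pos hc, ih]
  | case2 i h hc ih =>
      rw [stripB_loop, if_pos h, if_neg hc, ih]; simp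
  | case3 i h =>
      rw [stripB_loop, if_neg h]; simp

theorem sbeq (c d : Char) : (String.ofList [c] == String.ofList [d]) = (c == d) := by
  simp [String.ext_iff]

theorem slit_bs (c : Char) : (String.ofList [c] == "\\") = (c == '\\') := by
  simp [String.ext_iff]

theorem slit_x (c : Char) : (String.ofList [c] == "x") = (c == 'x') := by
  simp [String.ext_iff]

theorem hex_mem (c : Char) : hexTbl.contains (String.ofList [c]) = hexChars.contains c := by
  rw [show hexTbl = hexChars.map (fun d => String.ofList [d]) from rfl,
    List.contains_eq_any_beq, List.any_map, List.contains_eq_any_beq]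
  simp only [Function.comp_def, sbeq]

-- a blank cell never matches, and the state is unchanged
theorem stripA_blank_step (clist : List String) (ctr bnd : Nat)
    (h : ctr < bnd) (hb : clist.getD ctr "" = "") :
    stripA_loop clist ctr bnd = stripA_loop clist (ctr+1) bnd := by
  rw [stripA_loop, if_pos h, hb]
  simp [show (("":String) == "\\") = false from rfl]

theorem foldl_append_str (l : List String) (init : String) :
    l.foldl (· ++ ·) init = init ++ l.foldl (· ++ ·) "" := by
  induction l generalizing init with
  | nil => simp
  | cons a t ih =>
      simp only [List.foldl_cons]
      rw [ih (init ++ a), ih ("" ++ a)]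
      simp [String.append_assoc]

theorem join_append_str (l1 l2 : List String) :
    String.join (l1 ++ l2) = String.join l1 ++ String.join l2 := by
  simp only [String.join, List.foldl_append]
  rw [foldl_append_str l2]

theorem join_take_succ (l : List String) (k : Nat) (hk : k < l.length) :
    String.join (l.take (k+1)) = String.join (l.take k) ++ l.getD k "" := by
  rw [List.take_add_one, join_append_str]
  simp [List.getElem?_eq_getElem hk, List.getD, String.join]

theorem getD_set_ne (l : List String) (j k : Nat) (a : String) (h : j ≠ k) :
    (l.set j a).getD k "" = l.getD k "" := by
  simp [List.getD, List.getElem?_set_ne h]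

theorem getD_set_self (l : List String) (j : Nat) (a : String) (h : j < l.length) :
    (l.set j a).getD j "" = a := by
  simp [List.getD, h]

theorem take_set_ge (l : List String) (i j : Nat) (a : String) (hj : i ≤ j) :
    (l.set j a).take i = l.take i := by
  rw [List.take_set]
  apply List.set_eq_of_length_le
  simp; omega

-- A's flag at a position whose lookahead still holds the original characters is B's condition
theorem flg_eq (s : List Char) (clist : List String) (i : Nat)
    (_hlen : clist.length = s.length)
    (hinv : ∀ j, i ≤ j → j < s.length → clist.getD j "" = String.ofList [s.getD j ' '])
    (hi : i < s.length) :
    ((clist.getD i "" == "\\") && decide (i + 3 < s.length) && (clist.getD (i+1) "" == "x")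
      && hexTbl.contains (clist.getD (i+2) "") && hexTbl.contains (clist.getD (i+3) ""))
    = stripB_cond s i := by
  by_cases hi3 : i + 3 < s.length
  · rw [hinv i le_rfl hi, hinv (i+1) (by omega) (by omega), hinv (i+2) (by omega) (by omega),
      hinv (i+3) (by omega) (by omega), slit_bs, slit_x, hex_mem, hex_mem]
    simp [stripB_cond]
  · simp [stripB_cond, hi3]

-- main invariant: if every cell from ctr on still holds the original character, A's
-- remaining loop joins to the processed prefix followed by B's tail from ctr.
theorem stripA_main (s : List Char) (ctr : Nat) :
    ∀ (clist : List String), clist.length = s.length →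
    (∀ j, ctr ≤ j → j < s.length → clist.getD j "" = String.ofList [s.getD j ' ']) →
    String.join (stripA_loop clist ctr s.length) =
      String.join (clist.take ctr) ++ String.ofList (stripB_tail s ctr) := by
  fun_induction stripB_tail s ctr with
  | case1 i h hc ih =>
      intro clist hlen hinv
      obtain ⟨⟨⟨⟨-, hb3⟩, -⟩, -⟩, -⟩ :
          ((((s.getD i ' ' == '\\') = true ∧ i + 3 < s.length) ∧ (s.getD (i+1) ' ' == 'x') = true)
            ∧ hexChars.contains (s.getD (i+2) ' ') = true)
            ∧ hexChars.contains (s.getD (i+3) ' ') = true := by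
        simpa [stripB_cond] using hc
      have hfl : ((clist.getD i "" == "\\") && decide (i + 3 < s.length)
          && (clist.getD (i+1) "" == "x") && hexTbl.contains (clist.getD (i+2) "")
          && hexTbl.contains (clist.getD (i+3) "")) = true :=
        (flg_eq s clist i hlen hinv h).trans hc
      rw [stripA_loop, if_pos h]
      simp only [hfl, if_true]
      set cl' := ((((clist.set i "").set (i+1) "").set (i+2) "").set (i+3) "") with hcl'
      have hlen' : cl'.length = s.length := by simp [hcl', hlen]
      have hb1' : cl'.getD (i+1) "" = "" := by
        rw [hcl', getD_set_ne _ _ _ _ (by omega), getD_set_ne _ _ _ _ (by omega),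
          getD_set_self _ _ _ (by simp [hlen]; omega)]
      have hb2' : cl'.getD (i+2) "" = "" := by
        rw [hcl', getD_set_ne _ _ _ _ (by omega), getD_set_self _ _ _ (by simp [hlen]; omega)]
      have hb3' : cl'.getD (i+3) "" = "" := by
        rw [hcl', getD_set_self _ _ _ (by simp [hlen]; omega)]
      have hb0' : cl'.getD i "" = "" := by
        rw [hcl', getD_set_ne _ _ _ _ (by omega), getD_set_ne _ _ _ _ (by omega),
          getD_set_ne _ _ _ _ (by omega), getD_set_self _ _ _ (by omega)]
      rw [stripA_blank_step cl' (i+1) _ (by omega) hb1',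
        stripA_blank_step cl' (i+2) _ (by omega) hb2',
        stripA_blank_step cl' (i+3) _ (by omega) hb3',
        ih cl' hlen' (by
          intro j hj hjl
          rw [hcl', getD_set_ne _ _ _ _ (by omega), getD_set_ne _ _ _ _ (by omega),
            getD_set_ne _ _ _ _ (by omega), getD_set_ne _ _ _ _ (by omega)]
          exact hinv j (by omega) hjl)]
      rw [join_take_succ cl' (i+3) (by omega), hb3',
        join_take_succ cl' (i+2) (by omega), hb2',
        join_take_succ cl' (i+1) (by omega), hb1',
        join_take_succ cl' i (by omega), hb0']
      rw [hcl', take_set_ge _ _ _ _ (by omega), take_set_ge _ _ _ _ (by omega),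
        take_set_ge _ _ _ _ (by omega), take_set_ge _ _ _ _ (by omega)]
      simp
  | case2 i h hc ih =>
      intro clist hlen hinv
      have hfl : ((clist.getD i "" == "\\") && decide (i + 3 < s.length)
          && (clist.getD (i+1) "" == "x") && hexTbl.contains (clist.getD (i+2) "")
          && hexTbl.contains (clist.getD (i+3) "")) = false :=
        (flg_eq s clist i hlen hinv h).trans (by simpa using hc)
      rw [stripA_loop, if_pos h]
      simp only [hfl, if_false, Bool.false_eq_true]
      rw [ih clist hlen (fun j hj hjl => hinv j (by omega) hjl),
        join_take_succ clist i (by omega), hinv i le_rfl h,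
        show s.getD i ' ' :: stripB_tail s (i+1) = [s.getD i ' '] ++ stripB_tail s (i+1) from rfl,
        String.ofList_append, String.append_assoc]
  | case3 i h =>
      intro clist hlen _
      rw [stripA_loop, if_neg h, List.take_of_length_le (by omega)]
      simp

-- ===== VERDICT (by name: the statement is the Claim_ definition above) =====
theorem stripNUbyte_spec : Claim_equal_stripNUbyte := by
  intro cont _
  unfold Spec_stripNUbyte stripNUbyte stripNUbyte_alt
  rw [stripB_loop_eq]
  have h := stripA_main cont.toList 0 (cont.toList.map fun c => String.ofList [c])
    (by simp)
    (by
      intro j _ hj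
      simp [List.getD, List.getElem?_map, List.getElem?_eq_getElem hj])
  simpa using h
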